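-- pv_equiv track=rewrite | github.com/priest-2105/Sentra | engine/scanners/devops.py | _check_ci
-- ===== SOURCE A (Python) =====
-- CI_PATTERNS = [
--     ".github/workflows",
--     ".gitlab-ci.yml",
--     "Jenkinsfile",
--     ".circleci/config.yml",
--     ".travis.yml",
--     "azure-pipelines.yml",
--     "bitbucket-pipelines.yml",
--     ".drone.yml",
-- ]
--
-- def _check_ci(rel_paths: set, repo_dir: str) -> bool:
--     for pattern in CI_PATTERNS:
--         if pattern in rel_paths:
--             return True
--         # For directory patterns like .github/workflows
--         if "/" in pattern:
--             dir_part = pattern.split("/")[0]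
--             if any(p.startswith(dir_part + "/") for p in rel_paths):
--                 return True
--     return False
-- ===== SOURCE B (Python) =====
-- CI_PATTERNS = [
--     ".github/workflows",
--     ".gitlab-ci.yml",
--     "Jenkinsfile",
--     ".circleci/config.yml",
--     ".travis.yml",
--     "azure-pipelines.yml",
--     "bitbucket-pipelines.yml",
--     ".drone.yml",
-- ]
--
-- # Precomputed once from CI_PATTERNS: exact-name set, and directory prefixes
-- # like ".github/" for patterns that name a directory.
-- _LITERALS = frozenset(CI_PATTERNS)
-- _DIR_PREFIXES = tuple(p.split("/", 1)[0] + "/" for p in CI_PATTERNS if "/" in p)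
--
--
-- def _check_ci(rel_paths: set, repo_dir: str) -> bool:
--     return any(p in _LITERALS or p.startswith(_DIR_PREFIXES) for p in rel_paths)
-- ===== Notes on version B (the rewrite author's own statement) =====
-- stated objective: idiomatic
-- what changed: Inverts the traversal: instead of looping over CI_PATTERNS and scanning all paths per directory pattern, B precomputes a literal frozenset and a tuple of directory prefixes once and makes a single any() pass over rel_paths.
import Mathlib
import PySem

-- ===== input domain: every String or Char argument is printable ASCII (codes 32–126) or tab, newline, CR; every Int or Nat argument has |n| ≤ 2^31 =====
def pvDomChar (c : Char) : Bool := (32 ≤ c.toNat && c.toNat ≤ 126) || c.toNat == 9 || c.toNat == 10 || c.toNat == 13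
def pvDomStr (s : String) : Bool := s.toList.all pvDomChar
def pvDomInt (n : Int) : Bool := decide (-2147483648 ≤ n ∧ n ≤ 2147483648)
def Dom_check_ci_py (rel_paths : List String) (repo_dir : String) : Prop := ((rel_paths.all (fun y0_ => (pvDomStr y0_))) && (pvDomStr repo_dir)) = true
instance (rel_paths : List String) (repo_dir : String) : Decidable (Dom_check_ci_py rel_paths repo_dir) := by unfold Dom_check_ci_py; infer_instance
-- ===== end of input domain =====

-- B inverts the traversal: one pass over rel_paths against precomputed literal
-- set and directory prefixes, instead of A's loop over CI_PATTERNS that scans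
-- all paths per directory pattern (objective: idiomatic single pass).

-- ===== PORT A =====
def ciPatterns : List String :=
  [".github/workflows", ".gitlab-ci.yml", "Jenkinsfile", ".circleci/config.yml",
   ".travis.yml", "azure-pipelines.yml", "bitbucket-pipelines.yml", ".drone.yml"]

-- the 'for pattern in CI_PATTERNS' loop with its early returns
def checkCiLoop (rel_paths : List String) : List String → Bool
  | [] => false
  | pattern :: rest =>
    if PySem.Set.contains rel_paths pattern then true
    else if PySem.Str.isIn "/" pattern then
      -- dir_part = pattern.split("/")[0]
      let dir_part := (PySem.List.pyGet? ((PySem.Str.split? pattern "/").getD []) 0).getD ""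
      if rel_paths.any (fun p => PySem.Str.startswith p (dir_part ++ "/")) then true
      else checkCiLoop rel_paths rest
    else checkCiLoop rel_paths rest

def check_ci_py (rel_paths : List String) (repo_dir : String) : Bool :=
  checkCiLoop rel_paths ciPatterns

-- ===== PORT B =====
-- _LITERALS = frozenset(CI_PATTERNS)
def ciLiterals : PySem.Set String := PySem.Set.ofList ciPatterns

-- _DIR_PREFIXES = tuple(p.split("/", 1)[0] + "/" for p in CI_PATTERNS if "/" in p)
def ciDirPrefixes : List String :=
  (ciPatterns.filter (fun p => PySem.Str.isIn "/" p)).map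
    (fun p => (PySem.List.pyGet? ((PySem.Str.splitMax? p "/" 1).getD []) 0).getD "" ++ "/")

def check_ci_py_alt (rel_paths : List String) (repo_dir : String) : Bool :=
  rel_paths.any (fun p =>
    PySem.Set.contains ciLiterals p || ciDirPrefixes.any (fun pre => PySem.Str.startswith p pre))

-- ===== PRECONDITION & SPEC =====
def Spec_check_ci_py (rel_paths : List String) (repo_dir : String) (out : Bool) : Prop := out = check_ci_py_alt rel_paths repo_dir
instance (rel_paths : List String) (repo_dir : String) (out : Bool) : Decidable (Spec_check_ci_py rel_paths repo_dir out) := by unfold Spec_check_ci_py; infer_instance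

-- ===== CLAIM (what is proved, stated in full; the proofs are below) =====
def Claim_equal_check_ci_py : Prop := ∀ (rel_paths : List String) (repo_dir : String), Dom_check_ci_py rel_paths repo_dir → Spec_check_ci_py rel_paths repo_dir (check_ci_py rel_paths repo_dir)

-- ===== LEMMAS AND PROOFS =====

theorem ciDirPrefixes_eval : ciDirPrefixes = [".github/", ".circleci/"] := by decide

theorem check_ci_eq (rel_paths : List String) (repo_dir : String) :
    check_ci_py rel_paths repo_dir = check_ci_py_alt rel_paths repo_dir := by
  have e1 : PySem.Str.isIn "/" ".github/workflows" = true := by decide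
  have e2 : PySem.Str.isIn "/" ".gitlab-ci.yml" = false := by decide
  have e3 : PySem.Str.isIn "/" "Jenkinsfile" = false := by decide
  have e4 : PySem.Str.isIn "/" ".circleci/config.yml" = true := by decide
  have e5 : PySem.Str.isIn "/" ".travis.yml" = false := by decide
  have e6 : PySem.Str.isIn "/" "azure-pipelines.yml" = false := by decide
  have e7 : PySem.Str.isIn "/" "bitbucket-pipelines.yml" = false := by decide
  have e8 : PySem.Str.isIn "/" ".drone.yml" = false := by decide
  have d1 : (PySem.List.pyGet? ((PySem.Str.split? ".github/workflows" "/").getD []) 0).getD "" ++ "/" = ".github/" := by decide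
  have d4 : (PySem.List.pyGet? ((PySem.Str.split? ".circleci/config.yml" "/").getD []) 0).getD "" ++ "/" = ".circleci/" := by decide
  rw [Bool.eq_iff_iff]
  simp only [check_ci_py, check_ci_py_alt, checkCiLoop, ciPatterns, ciLiterals, ciDirPrefixes_eval,
    e1, e2, e3, e4, e5, e6, e7, e8, d1, d4, if_true, if_false, Bool.false_eq_true,
    Bool.if_true_left, Bool.or_eq_true, List.any_eq_true, List.any_cons, List.any_nil,
    PySem.Set.contains_iff, PySem.Set.mem_ofList, List.mem_cons, List.not_mem_nil, or_false,
    decide_eq_true_eq]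
  constructor
  · rintro (h | h | h | h | h | h | h | h | h | h) <;>
      first
        | (obtain ⟨p, hp, hs⟩ := h; exact ⟨p, hp, by tauto⟩)
        | exact ⟨_, h, by tauto⟩
  · rintro ⟨p, hp, (rfl | rfl | rfl | rfl | rfl | rfl | rfl | rfl) | hs | hs⟩ <;>
      first
        | exact Or.inr (Or.inl ⟨p, hp, hs⟩)
        | exact Or.inr (Or.inr (Or.inr (Or.inr (Or.inr (Or.inl ⟨p, hp, hs⟩)))))
        | tauto

-- ===== VERDICT (by name: the statement is the Claim_ definition above) =====
theorem check_ci_py_spec : Claim_equal_check_ci_py := by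
  intro rel_paths repo_dir _
  unfold Spec_check_ci_py
  exact check_ci_eq rel_paths repo_dir
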